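-- pv_equiv track=rewrite | github.com/cyril-data/dreamerv3_stable | dreamerv3/policy.py | _compute_encoder_output_shape
-- ===== SOURCE A (Python) =====
-- def _compute_encoder_output_shape(input_h, input_w, kernels, strides, paddings):
--     """Calculate spatial dimensions at each step of the encoder"""
--     spatial_dims = [(input_h, input_w)]
--
--     h, w = input_h, input_w
--     for kernel, stride, padding in zip(kernels, strides, paddings):
--         h = (h + 2 * padding - kernel) // stride + 1
--         w = (w + 2 * padding - kernel) // stride + 1
--         spatial_dims.append((h, w))
--
--     return spatial_dims
-- ===== SOURCE B (Python) =====
-- def _compute_encoder_output_shape(input_h, input_w, kernels, strides, paddings):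
--     """Calculate spatial dimensions at each step of the encoder.
--
--     Stateless prefix-recompute: the dims after i layers depend only on the
--     first i (kernel, stride, padding) triples, so each output entry is
--     computed independently by reducing that prefix for one dimension."""
--     layers = list(zip(kernels, strides, paddings))
--
--     def dim_after(d, prefix):
--         for kernel, stride, padding in prefix:
--             d = (d + 2 * padding - kernel) // stride + 1
--         return d
--
--     return [(dim_after(input_h, layers[:i]), dim_after(input_w, layers[:i]))
--             for i in range(len(layers) + 1)]
-- ===== Notes on version B (the rewrite author's own statement) =====
-- stated objective: alternative
-- what changed: Replaced A's single stateful pass carrying (h,w) by a stateless prefix-recompute: each of the n+1 output entries is computed independently by reducing the corresponding prefix of layers, once per dimension (O(n^2) instead of O(n), no running state between entries).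
import Mathlib
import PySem

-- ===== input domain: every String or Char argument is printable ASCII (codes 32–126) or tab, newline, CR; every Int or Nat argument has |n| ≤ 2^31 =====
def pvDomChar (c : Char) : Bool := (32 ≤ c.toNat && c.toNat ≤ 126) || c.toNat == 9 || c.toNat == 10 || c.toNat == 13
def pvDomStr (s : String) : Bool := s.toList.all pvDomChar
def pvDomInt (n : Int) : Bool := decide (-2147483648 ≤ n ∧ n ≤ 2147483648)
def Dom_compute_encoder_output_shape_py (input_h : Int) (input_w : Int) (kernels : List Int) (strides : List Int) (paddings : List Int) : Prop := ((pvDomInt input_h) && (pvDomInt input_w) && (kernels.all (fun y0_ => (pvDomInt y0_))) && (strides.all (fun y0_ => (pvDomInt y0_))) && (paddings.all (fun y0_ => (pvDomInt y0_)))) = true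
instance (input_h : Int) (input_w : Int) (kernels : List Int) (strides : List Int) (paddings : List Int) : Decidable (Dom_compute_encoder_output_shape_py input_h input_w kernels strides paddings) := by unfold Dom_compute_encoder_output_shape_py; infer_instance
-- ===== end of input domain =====

-- B replaces A's single stateful (h,w)-carrying pass by a stateless prefix-recompute:
-- each output entry is computed independently by reducing the matching prefix of
-- layers, once per dimension (objective: alternative; O(n^2) instead of O(n)).

-- ===== PORT A =====
-- literal port of A: one loop over zip(kernels, strides, paddings) carrying
-- (spatial_dims, h, w); list append at the end of each iteration
def compute_encoder_output_shape_py (input_h : Int) (input_w : Int) (kernels : List Int) (strides : List Int) (paddings : List Int) : List (Int × Int) :=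
  ((kernels.zip (strides.zip paddings)).foldl
    (fun (st : List (Int × Int) × Int × Int) t =>
      let h := PySem.Int.floordiv (st.2.1 + 2 * t.2.2 - t.1) t.2.1 + 1
      let w := PySem.Int.floordiv (st.2.2 + 2 * t.2.2 - t.1) t.2.1 + 1
      (st.1 ++ [(h, w)], h, w))
    ([(input_h, input_w)], input_h, input_w)).1

-- ===== PORT B =====
-- Source B's dim_after: reduce one dimension over a prefix of the layers
def pvDimAfter (d : Int) (prefix_ : List (Int × Int × Int)) : Int :=
  prefix_.foldl (fun d t => PySem.Int.floordiv (d + 2 * t.2.2 - t.1) t.2.1 + 1) d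

-- comprehension over range(len(layers)+1), slicing layers[:i] each time
def compute_encoder_output_shape_py_alt (input_h : Int) (input_w : Int) (kernels : List Int) (strides : List Int) (paddings : List Int) : List (Int × Int) :=
  let layers := kernels.zip (strides.zip paddings)
  (List.range (layers.length + 1)).map
    (fun i => (pvDimAfter input_h (layers.take i), pvDimAfter input_w (layers.take i)))

-- ===== PRECONDITION & SPEC =====
-- Pre_ excludes exactly the inputs where a consumed stride is 0: there Python's
-- '//' raises ZeroDivisionError in A (and in B alike), so A returns no value.
def Pre_compute_encoder_output_shape_py (input_h : Int) (input_w : Int) (kernels : List Int) (strides : List Int) (paddings : List Int) : Prop :=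
  ∀ t ∈ kernels.zip (strides.zip paddings), t.2.1 ≠ 0
instance (input_h : Int) (input_w : Int) (kernels : List Int) (strides : List Int) (paddings : List Int) : Decidable (Pre_compute_encoder_output_shape_py input_h input_w kernels strides paddings) := by unfold Pre_compute_encoder_output_shape_py; infer_instance

def pvWitness_compute_encoder_output_shape_py : Int × Int × List Int × List Int × List Int := (64, 64, [4, 4], [2, 2], [1, 1])

def Spec_compute_encoder_output_shape_py (input_h : Int) (input_w : Int) (kernels : List Int) (strides : List Int) (paddings : List Int) (out : List (Int × Int)) : Prop := out = compute_encoder_output_shape_py_alt input_h input_w kernels strides paddings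
instance (input_h : Int) (input_w : Int) (kernels : List Int) (strides : List Int) (paddings : List Int) (out : List (Int × Int)) : Decidable (Spec_compute_encoder_output_shape_py input_h input_w kernels strides paddings out) := by unfold Spec_compute_encoder_output_shape_py; infer_instance

-- ===== CLAIM (what is proved, stated in full; the proofs are below) =====
def Claim_equal_compute_encoder_output_shape_py : Prop := ∀ (input_h : Int) (input_w : Int) (kernels : List Int) (strides : List Int) (paddings : List Int), Dom_compute_encoder_output_shape_py input_h input_w kernels strides paddings → Pre_compute_encoder_output_shape_py input_h input_w kernels strides paddings → Spec_compute_encoder_output_shape_py input_h input_w kernels strides paddings (compute_encoder_output_shape_py input_h input_w kernels strides paddings)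

-- ===== LEMMAS AND PROOFS =====

-- reference tail of A's loop (elements appended after the initial pair)
def pvRefA (h w : Int) : List (Int × Int × Int) → List (Int × Int)
  | [] => []
  | t :: ts =>
      let h' := PySem.Int.floordiv (h + 2 * t.2.2 - t.1) t.2.1 + 1
      let w' := PySem.Int.floordiv (w + 2 * t.2.2 - t.1) t.2.1 + 1
      (h', w') :: pvRefA h' w' ts

theorem pvA_fold (ts : List (Int × Int × Int)) :
    ∀ (acc : List (Int × Int)) (h w : Int),
      (ts.foldl
        (fun (st : List (Int × Int) × Int × Int) t =>
          let h := PySem.Int.floordiv (st.2.1 + 2 * t.2.2 - t.1) t.2.1 + 1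
          let w := PySem.Int.floordiv (st.2.2 + 2 * t.2.2 - t.1) t.2.1 + 1
          (st.1 ++ [(h, w)], h, w))
        (acc, h, w)).1 = acc ++ pvRefA h w ts := by
  induction ts with
  | nil => intro acc h w; simp [pvRefA]
  | cons t ts ih =>
      intro acc h w
      simp only [List.foldl_cons, pvRefA, ih, List.append_assoc, List.cons_append,
        List.nil_append]

-- B's prefix map equals the initial pair followed by A's reference tail
theorem pvPrefix_map (ts : List (Int × Int × Int)) :
    ∀ (h w : Int),
      (List.range (ts.length + 1)).map
        (fun i => (pvDimAfter h (ts.take i), pvDimAfter w (ts.take i)))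
        = (h, w) :: pvRefA h w ts := by
  induction ts with
  | nil => intro h w; simp [pvRefA, pvDimAfter]
  | cons t ts ih =>
      intro h w
      rw [List.length_cons, List.range_succ_eq_map, List.map_cons, List.map_map]
      have step : ((List.range (ts.length + 1)).map
          ((fun i => (pvDimAfter h ((t :: ts).take i), pvDimAfter w ((t :: ts).take i))) ∘ Nat.succ))
          = (List.range (ts.length + 1)).map
            (fun i => (pvDimAfter (PySem.Int.floordiv (h + 2 * t.2.2 - t.1) t.2.1 + 1) (ts.take i),
                       pvDimAfter (PySem.Int.floordiv (w + 2 * t.2.2 - t.1) t.2.1 + 1) (ts.take i))) := by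
        apply List.map_congr_left
        intro i _
        simp [Function.comp, pvDimAfter]
      rw [step, ih]
      simp [pvRefA, pvDimAfter]

-- ===== VERDICT (by name: the statement is the Claim_ definition above) =====
theorem compute_encoder_output_shape_py_spec : Claim_equal_compute_encoder_output_shape_py := by
  intro input_h input_w kernels strides paddings _ _
  unfold Spec_compute_encoder_output_shape_py
  unfold compute_encoder_output_shape_py compute_encoder_output_shape_py_alt
  rw [pvA_fold, pvPrefix_map]
  simp
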